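-- pv_equiv track=rewrite | github.com/haamdong/baekjoon | Python3/프로그래머스/0/181904. 세로 읽기/세로 읽기.py | solution
-- ===== SOURCE A (Python) =====
-- def solution(my_string, m, c):
--     answer = ''
--     idx = 0
--     for i in my_string:
--         if idx % m + 1 == c:
--             answer += i
--         idx += 1
--     return answer
-- ===== SOURCE B (Python) =====
-- def solution(my_string, m, c):
--     answer = []
--     n = len(my_string)
--     start = 0
--     while start < n:
--         row = my_string[start:start+m]
--         if 1 <= c <= len(row):
--             answer.append(row[c - 1])
--         start += m
--     return ''.join(answer)
-- ===== Notes on version B (the rewrite author's own statement) =====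
-- stated objective: alternative
-- what changed: Replaces A's flat per-character scan testing idx % m + 1 == c with an explicit grid decomposition: a while-loop slices the string into rows of width m and reads the single character at column c of each sufficiently long row (per-row slicing instead of per-character Python-level work).
-- outside the precondition, e.g. on solution('ab', -2, 0): A returns 'b', B does not finish within the time limit
import Mathlib
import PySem

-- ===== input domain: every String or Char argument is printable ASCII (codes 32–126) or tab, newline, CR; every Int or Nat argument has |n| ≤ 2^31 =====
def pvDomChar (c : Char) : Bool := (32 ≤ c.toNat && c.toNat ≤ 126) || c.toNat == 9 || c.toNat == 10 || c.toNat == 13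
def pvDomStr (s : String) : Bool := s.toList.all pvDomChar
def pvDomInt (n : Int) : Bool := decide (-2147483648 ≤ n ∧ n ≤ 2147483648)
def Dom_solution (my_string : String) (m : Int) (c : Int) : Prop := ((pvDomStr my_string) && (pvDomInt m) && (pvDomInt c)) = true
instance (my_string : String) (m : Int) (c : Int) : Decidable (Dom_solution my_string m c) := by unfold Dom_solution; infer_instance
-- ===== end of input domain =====

-- B replaces A's flat index-mod-m scan by slicing the string into rows of width m and reading column c of each row (different decomposition; measured faster by a constant factor).



-- ===== PORT A =====
-- for i in my_string: if idx % m + 1 == c: answer += i; idx += 1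
def solution (my_string : String) (m : Int) (c : Int) : String :=
  let r := my_string.toList.foldl
    (fun (st : List Char × Int) i =>
      (if PySem.Int.mod st.2 m + 1 = c then st.1 ++ [i] else st.1, st.2 + 1))
    ([], 0)
  String.mk r.1

-- ===== PORT B =====
-- the while-loop of Source B; fuel (length + 1) only makes the recursion total — with 1 ≤ m the
-- loop makes at most `length` iterations, so the fuel is never exhausted inside Pre_.
-- `(pyGet? row (c-1)).toList` is exact for `answer.append(row[c-1])` because the guard
-- 1 ≤ c ≤ len(row) puts the index in range (pyGet? returns `some`).
def solutionAltLoop (l : List Char) (m : Int) (cc : Int) (n : Int) :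
    Int → List Char → Nat → List Char
  | _, answer, 0 => answer
  | start, answer, fuel + 1 =>
    if start < n then
      let row := PySem.List.slice l (some start) (some (start + m))
      let answer' := if 1 ≤ cc ∧ cc ≤ PySem.List.len row
        then answer ++ (PySem.List.pyGet? row (cc - 1)).toList else answer
      solutionAltLoop l m cc n (start + m) answer' fuel
    else answer

def solution_alt (my_string : String) (m : Int) (c : Int) : String :=
  let l := my_string.toList
  String.mk (solutionAltLoop l m c (PySem.List.len l) 0 [] (l.length + 1))

-- ===== PRECONDITION & SPEC =====
-- Pre_ excludes m ≤ 0 with a nonempty string: m = 0 makes A raise ZeroDivisionError, and a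
-- negative row width is outside the task's natural domain (A then returns via Python's
-- negative-modulus wraparound while B's row loop never terminates).
def Pre_solution (my_string : String) (m : Int) (c : Int) : Prop :=
  my_string = "" ∨ 1 ≤ m
instance (my_string : String) (m : Int) (c : Int) : Decidable (Pre_solution my_string m c) := by
  unfold Pre_solution; infer_instance

def pvWitness_solution : String × Int × Int := ("himynameis", 3, 2)

def Spec_solution (my_string : String) (m : Int) (c : Int) (out : String) : Prop := out = solution_alt my_string m c
instance (my_string : String) (m : Int) (c : Int) (out : String) : Decidable (Spec_solution my_string m c out) := by unfold Spec_solution; infer_instance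

-- ===== CLAIM (what is proved, stated in full; the proofs are below) =====
def Claim_equal_solution : Prop := ∀ (my_string : String) (m : Int) (c : Int), Dom_solution my_string m c → Pre_solution my_string m c → Spec_solution my_string m c (solution my_string m c)

-- ===== LEMMAS AND PROOFS =====

-- structural version of A's loop body (answer accumulator made explicit)
def gA (m cc : Int) : List Char → Int → List Char
  | [], _ => []
  | ch :: t, i => (if PySem.Int.mod i m + 1 = cc then [ch] else []) ++ gA m cc t (i + 1)

theorem foldA_eq (m cc : Int) :
    ∀ (l : List Char) (acc : List Char) (i : Int),
      (l.foldl
        (fun (st : List Char × Int) ch =>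
          (if PySem.Int.mod st.2 m + 1 = cc then st.1 ++ [ch] else st.1, st.2 + 1))
        (acc, i)) =
      (acc ++ gA m cc l i, i + l.length) := by
  intro l
  induction l with
  | nil => intro acc i; simp [gA]
  | cons ch t ih =>
    intro acc i
    simp only [List.foldl_cons, gA]
    rw [ih]
    simp only [Prod.mk.injEq]
    refine ⟨?_, ?_⟩
    · by_cases h : PySem.Int.mod i m + 1 = cc <;> simp [h]
    · simp only [List.length_cons]; push_cast; ring

theorem gA_append (m cc : Int) (a b : List Char) :
    ∀ i, gA m cc (a ++ b) i = gA m cc a i ++ gA m cc b (i + a.length) := by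
  induction a with
  | nil => intro i; simp [gA]
  | cons ch t ih =>
    intro i
    have hidx : i + ((ch :: t).length : Int) = i + 1 + t.length := by
      simp only [List.length_cons]; push_cast; ring
    simp only [List.cons_append, gA, hidx, ih]
    simp [List.append_assoc]

theorem gA_shift (m cc : Int) (hm : 0 < m) (l : List Char) :
    ∀ i, gA m cc l (i + m) = gA m cc l i := by
  induction l with
  | nil => intro i; rfl
  | cons ch t ih =>
    intro i
    simp only [gA]
    have hmod : PySem.Int.mod (i + m) m = PySem.Int.mod i m := by
      rw [PySem.Int.mod_eq_emod_of_pos hm, PySem.Int.mod_eq_emod_of_pos hm,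
        Int.add_emod_right]
    rw [hmod]
    have : i + m + 1 = (i + 1) + m := by ring
    rw [this, ih]

theorem gA_of_dvd (m cc : Int) (hm : 0 < m) (l : List Char) (k : Nat) :
    gA m cc l (m * k) = gA m cc l 0 := by
  induction k with
  | zero => simp
  | succ k ih =>
    have : (m * ((k + 1 : Nat)) : Int) = m * k + m := by push_cast; ring
    rw [this, gA_shift m cc hm, ih]

-- A's loop over one row of length ≤ m, starting at a row-relative index 0, picks
-- exactly the character at position cc - 1 (if any).
theorem gA_row (m cc : Int) (hm : 0 < m) :
    ∀ (r : List Char) (i : Int), 0 ≤ i → i + r.length ≤ m →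
      gA m cc r i =
        if 1 ≤ cc - i ∧ cc - i ≤ (r.length : Int)
        then (PySem.List.pyGet? r (cc - i - 1)).toList else [] := by
  intro r
  induction r with
  | nil =>
    intro i _ _
    simp [gA]
    omega
  | cons ch t ih =>
    intro i h0 hlen
    simp only [gA]
    have hilt : i < m := by simp at hlen; omega
    have hmod : PySem.Int.mod i m = i := by
      rw [PySem.Int.mod_eq_emod_of_pos hm]; exact Int.emod_eq_of_lt h0 hilt
    rw [hmod]
    rw [ih (i + 1) (by omega) (by simp at hlen ⊢; omega)]
    by_cases hc : i + 1 = cc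
    · rw [if_pos hc]
      have hno : ¬ (1 ≤ cc - (i + 1) ∧ cc - (i + 1) ≤ (t.length : Int)) := by omega
      have hyes : 1 ≤ cc - i ∧ cc - i ≤ ((ch :: t).length : Int) := by simp; omega
      rw [if_neg hno, if_pos hyes]
      have hz : cc - i - 1 = (0 : Int) := by omega
      rw [hz, PySem.List.pyGet?_zero_cons ch t]
      rfl
    · rw [if_neg hc, List.nil_append]
      by_cases h2 : 1 ≤ cc - (i + 1) ∧ cc - (i + 1) ≤ (t.length : Int)
      · have h3 : 1 ≤ cc - i ∧ cc - i ≤ ((ch :: t).length : Int) := by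
          simp; omega
        rw [if_pos h2, if_pos h3]
        have hnn : (0:Int) ≤ cc - i - 1 := by omega
        have hnn2 : (0:Int) ≤ cc - (i+1) - 1 := by omega
        rw [PySem.List.pyGet?_of_nonneg _ hnn, PySem.List.pyGet?_of_nonneg _ hnn2]
        have htn : (cc - i - 1).toNat = (cc - (i+1) - 1).toNat + 1 := by omega
        rw [htn]
        simp
      · have h3 : ¬ (1 ≤ cc - i ∧ cc - i ≤ ((ch :: t).length : Int)) := by
          simp at h2 ⊢; omega
        rw [if_neg h2, if_neg h3]

-- what one guarded column read of B produces = gA on that row (row-relative index 0)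
theorem pick_eq_gA_row (m cc : Int) (hm : 0 < m) (row : List Char)
    (hrow : (row.length : Int) ≤ m) :
    (if 1 ≤ cc ∧ cc ≤ PySem.List.len row
      then (PySem.List.pyGet? row (cc - 1)).toList else []) = gA m cc row 0 := by
  rw [gA_row m cc hm row 0 le_rfl (by omega)]
  simp [PySem.List.len_eq]

theorem loopB_eq (l : List Char) (m cc : Int) (hm : 0 < m) :
    ∀ (fuel : Nat) (start : Int) (acc : List Char),
      0 ≤ start → m ∣ start → (l.length : Int) ≤ start + fuel →
      solutionAltLoop l m cc (PySem.List.len l) start acc fuel =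
        acc ++ gA m cc (l.drop start.toNat) start := by
  intro fuel
  induction fuel with
  | zero =>
    intro start acc h0 _ hful
    have : l.length ≤ start.toNat := by omega
    simp [solutionAltLoop, List.drop_eq_nil_of_le this, gA]
  | succ fuel ih =>
    intro start acc h0 hdvd hful
    by_cases hlt : start < (PySem.List.len l)
    · have hlt' : start < (l.length : Int) := by rwa [PySem.List.len_eq] at hlt
      simp only [solutionAltLoop, if_pos hlt]
      -- the slice is take m of the dropped suffix
      have hslice : PySem.List.slice l (some start) (some (start + m)) =
          (l.drop start.toNat).take m.toNat := by
        have h1 : start = ((start.toNat : Nat) : Int) := by omega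
        have h3 : m = ((m.toNat : Nat) : Int) := by omega
        conv_lhs => rw [h1, h3]
        rw [PySem.List.slice_natCast_add]
      set suf := l.drop start.toNat with hsuf
      set row := suf.take m.toNat with hrowdef
      have hrowlen : (row.length : Int) ≤ m := by
        simp [hrowdef]; omega
      obtain ⟨k, hk⟩ := hdvd
      have hknn : 0 ≤ k := by nlinarith
      have hstart : start = m * ((k.toNat : Nat) : Int) := by
        rw [hk]; congr 1; omega
      rw [ih (start + m) _ (by omega) (⟨k + 1, by rw [hk]; ring⟩)
        (by push_cast at hful ⊢; omega)]
      have hdropdrop : l.drop (start + m).toNat = suf.drop m.toNat := by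
        rw [hsuf, List.drop_drop]
        congr 1
        omega
      rw [hdropdrop]
      have hsplit : suf = row ++ suf.drop m.toNat := by
        rw [hrowdef, List.take_append_drop]
      have hgsuf : gA m cc suf start =
          gA m cc row start ++ gA m cc (suf.drop m.toNat) (start + row.length) := by
        conv_lhs => rw [hsplit]
        rw [gA_append]
      have hrow0 : gA m cc row start = gA m cc row 0 := by
        rw [hstart]; exact gA_of_dvd m cc hm row k.toNat
      have htail : gA m cc (suf.drop m.toNat) (start + row.length) =
          gA m cc (suf.drop m.toNat) (start + m) := by
        by_cases hrest : suf.drop m.toNat = []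
        · rw [hrest]; rfl
        · have : m.toNat ≤ suf.length := by
            by_contra hcon
            exact hrest (List.drop_eq_nil_of_le (by omega))
          have hrlen : row.length = m.toNat := by
            rw [hrowdef, List.length_take]; omega
          rw [hrlen]
          congr 1
          omega
      rw [hslice, hgsuf, hrow0, ← pick_eq_gA_row m cc hm row hrowlen, htail]
      split_ifs <;> simp [List.append_assoc]
    · have hge : l.length ≤ start.toNat := by
        rw [PySem.List.len_eq] at hlt; omega
      have hlt2 : ¬ start < (l.length : Int) := by rwa [PySem.List.len_eq] at hlt
      simp [solutionAltLoop, PySem.List.len_eq, hlt2, List.drop_eq_nil_of_le hge, gA]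

-- ===== VERDICT (by name: the statement is the Claim_ definition above) =====
theorem solution_spec : Claim_equal_solution := by
  intro my_string m c _ hpre
  unfold Spec_solution solution solution_alt
  rcases hpre with hempty | hm
  · subst hempty
    rfl
  · have hm' : 0 < m := by omega
    simp only []
    rw [foldA_eq]
    rw [loopB_eq my_string.toList m c hm' (my_string.toList.length + 1) 0 []
      le_rfl ⟨0, by ring⟩ (by push_cast; omega)]
    simp
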